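-- pv_equiv track=rewrite | github.com/shuhangchen/cs61A | hw/hw03/hw03.py | generate_solution_list
-- ===== SOURCE A (Python) =====
-- def generate_solution_list(cols, n, r):
--     """ this function tries the find all possible solutions in the checkboard in the r-th row and form a list """
--
--     pos_lst = legit_position(n, r, cols)
--     cols_lst = []
--     if pos_lst == []:
--         return []
--     else:
--         for i in range(len(pos_lst)):
--             cols_temp = cols[:]
--             cols_temp[r] = pos_lst[i]
--             cols_lst = cols_lst + [cols_temp]
--         return cols_lst
--
-- def legit_position(n, r, cols):
--     def check_diag(n, r, cols, i):
--         """ check is the i-th (index) position in the r-th row is diagonally legit in both directions"""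
--         return check_diag_posi(n, r, cols, i) and check_diag_nega(n, r, cols, i)
--
--     def check_diag_posi(n, r, cols, i):
--         """ check is the i-th (index) position in the r-th row is positive diagonally legit"""
--         if r == 0:
--             return True
--         elif i < r :
--             for k,j in zip(range(i), cols[r-i:r]):
--                 if k == j:
--                     return False
--             return True
--             # for k in range(i):
--             #     if k in cols[(r-i):r] :
--             #         return False
--             # return True
--         else:
--             for k,j in zip(range(i-r,i),cols[:r]):
--                 if k == j:
--                     return False
--             return True
--
--             # for k in range(i-r, i):
--             #     if k in cols[:r]:
--             #         return False
--             # return True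
--
--     def check_diag_nega(n, r, cols, i):
--         """check is the i-th (index) position in the r-th row is negatively diagonally legit"""
--
--         if r == 0 :
--             return True
--         elif i > n - 1 - r :
--             for k,j in zip(range(i+1,n), reversed(cols[i+r-n +1:r])):
--                 if k==j:
--                     return False
--             return True
--
--             # for k in range(i+1, n):
--             #     if k in cols[i + r - n + 1 :r]:
--             #         return False
--             # return True
--         else:
--             for k,j in zip(range(i + 1, i + r + 1), reversed(cols[:r])):
--                 if k == j:
--                     return False
--             return True
--             # for k in range(i +1 , i +r + 1):
--             #     if k in cols[:r] :
--             #         return False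
--             # return True         #
--
--
--     def check_condition(n, r, cols, i):
--         """ check is the i-th position in the r-th row is vertically and
--     diagonally legit"""
--         if r == 0:
--             return True
--         elif i in cols[:r]:  # vertical
--             return False
--         else:
--             return check_diag(n, r, cols, i)
--
--     # check each postion in the r-th row and returns a list contains the legit positions
--     legit = []
--     for pos in range(n):
--         if check_condition(n, r, cols, pos):
--             legit = legit + [pos]
--
--     return legit
-- ===== SOURCE B (Python) =====
-- def generate_solution_list(cols, n, r):
--     legit = [c for c in range(n)
--              if all(cols[rr] != c and abs(cols[rr] - c) != r - rr for rr in range(r))]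
--     if legit == []:
--         return []
--     boards = []
--     for c in legit:
--         board = cols[:]
--         board[r] = c
--         boards.append(board)
--     return boards
-- ===== Notes on version B (the rewrite author's own statement) =====
-- stated objective: simpler
-- what changed: B replaces A's four nested helpers (two sliced-and-zipped diagonal projections per direction plus a separate vertical membership pass) with a single comprehension doing one abs-difference conflict scan over the previous rows.
-- outside the precondition, e.g. on generate_solution_list([-1, 0], 2, 1): A returns [[-1, 0], [-1, 1]], B returns [[-1, 1]]; on generate_solution_list([0, 1], 2, -1): A returns [[0, 1]], B returns [[0, 0], [0, 1]]
import Mathlib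
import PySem

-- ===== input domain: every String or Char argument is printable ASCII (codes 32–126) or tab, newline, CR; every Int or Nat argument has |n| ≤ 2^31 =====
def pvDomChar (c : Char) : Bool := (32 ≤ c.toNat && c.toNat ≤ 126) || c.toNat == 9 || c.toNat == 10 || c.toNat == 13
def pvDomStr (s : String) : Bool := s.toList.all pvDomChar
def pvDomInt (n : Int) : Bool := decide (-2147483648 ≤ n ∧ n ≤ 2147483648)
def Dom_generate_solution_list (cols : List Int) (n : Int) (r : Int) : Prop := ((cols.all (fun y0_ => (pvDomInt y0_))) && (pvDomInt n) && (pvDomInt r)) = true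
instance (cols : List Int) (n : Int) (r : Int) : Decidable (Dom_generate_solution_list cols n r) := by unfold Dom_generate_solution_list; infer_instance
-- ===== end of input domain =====

-- B drops A's four nested diagonal-projection helpers for one abs-difference scan over
-- the previous rows (objective: simpler); equivalence is about the return value only.

-- ===== PORT A =====
def pvA_check_diag_posi (n r : Int) (cols : List Int) (i : Int) : Bool :=
  if r == 0 then true
  else if i < r then
    ((PySem.List.pyRange 0 i 1).zip (PySem.List.slice cols (some (r - i)) (some r))).all
      (fun p => !(p.1 == p.2))
  else
    ((PySem.List.pyRange (i - r) i 1).zip (PySem.List.slice cols none (some r))).all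
      (fun p => !(p.1 == p.2))

def pvA_check_diag_nega (n r : Int) (cols : List Int) (i : Int) : Bool :=
  if r == 0 then true
  else if i > n - 1 - r then
    ((PySem.List.pyRange (i + 1) n 1).zip
        ((PySem.List.slice cols (some (i + r - n + 1)) (some r)).reverse)).all
      (fun p => !(p.1 == p.2))
  else
    ((PySem.List.pyRange (i + 1) (i + r + 1) 1).zip
        ((PySem.List.slice cols none (some r)).reverse)).all
      (fun p => !(p.1 == p.2))

def pvA_check_diag (n r : Int) (cols : List Int) (i : Int) : Bool :=
  pvA_check_diag_posi n r cols i && pvA_check_diag_nega n r cols i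

def pvA_check_condition (n r : Int) (cols : List Int) (i : Int) : Bool :=
  if r == 0 then true
  else if (PySem.List.slice cols none (some r)).contains i then false
  else pvA_check_diag n r cols i

def pvA_legit_position (n r : Int) (cols : List Int) : List Int :=
  (PySem.List.pyRange 0 n 1).foldl
    (fun legit pos => if pvA_check_condition n r cols pos then legit ++ [pos] else legit) []

def generate_solution_list (cols : List Int) (n : Int) (r : Int) : List (List Int) :=
  let pos_lst := pvA_legit_position n r cols
  if pos_lst == [] then []
  else
    (PySem.List.pyRange 0 pos_lst.length 1).foldl
      (fun cols_lst i =>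
        cols_lst ++ [PySem.List.pySetD cols r (PySem.List.pyGetD pos_lst i 0)]) []

-- ===== PORT B =====
def pvB_ok (cols : List Int) (r : Int) (c : Int) : Bool :=
  (PySem.List.pyRange 0 r 1).all (fun rr =>
    let q := PySem.List.pyGetD cols rr 0
    !(q == c) && !(((q - c).natAbs : Int) == r - rr))

def generate_solution_list_alt (cols : List Int) (n : Int) (r : Int) : List (List Int) :=
  let legit := (PySem.List.pyRange 0 n 1).filter (fun c => pvB_ok cols r c)
  if legit == [] then []
  else legit.foldl (fun boards c => boards ++ [PySem.List.pySetD cols r c]) []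

-- ===== PRECONDITION & SPEC =====
-- Pre_ is the function's natural domain: either no columns to try (n ≤ 0, both return []),
-- or r is a valid row index and the queens already placed in rows 0..r-1 sit on the board
-- (0 ≤ cols[s] < n). Outside it A raises IndexError (r out of range with a nonempty
-- candidate list), or returns accidental values: negative-index wraparound for r < 0, and
-- off-board column values in cols[:r] that A's projected diagonal slices silently skip.
def Pre_generate_solution_list (cols : List Int) (n : Int) (r : Int) : Prop :=
  n ≤ 0 ∨ (0 ≤ r ∧ r < (cols.length : Int) ∧ ∀ x ∈ cols.take r.toNat, 0 ≤ x ∧ x < n)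
instance (cols : List Int) (n : Int) (r : Int) : Decidable (Pre_generate_solution_list cols n r) := by unfold Pre_generate_solution_list; infer_instance

def pvWitness_generate_solution_list : List Int × Int × Int := ([0, 2, 7], 4, 1)

def Spec_generate_solution_list (cols : List Int) (n : Int) (r : Int) (out : List (List Int)) : Prop := out = generate_solution_list_alt cols n r
instance (cols : List Int) (n : Int) (r : Int) (out : List (List Int)) : Decidable (Spec_generate_solution_list cols n r out) := by unfold Spec_generate_solution_list; infer_instance

-- ===== CLAIM (what is proved, stated in full; the proofs are below) =====
def Claim_equal_generate_solution_list : Prop := ∀ (cols : List Int) (n : Int) (r : Int), Dom_generate_solution_list cols n r → Pre_generate_solution_list cols n r → Spec_generate_solution_list cols n r (generate_solution_list cols n r)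

-- ===== LEMMAS AND PROOFS =====

-- zip of a unit-step range with a list of the same length is enumerate
theorem pv_zip_pyRange_enum (l : List Int) : ∀ (a b : Int), (b - a).toNat = l.length →
    (PySem.List.pyRange a b 1).zip l = PySem.List.enumerate l a := by
  induction l with
  | nil =>
    intro a b h
    simp only [List.length_nil] at h
    have : b ≤ a := by omega
    simp [PySem.List.pyRange_one_eq_nil this, PySem.List.enumerate_nil]
  | cons x xs ih =>
    intro a b h
    simp only [List.length_cons] at h
    have hab : a < b := by omega
    rw [PySem.List.pyRange_one_cons hab, List.zip_cons_cons, ih (a + 1) b (by omega),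
      PySem.List.enumerate_cons]

-- accumulate-append loop = filter
theorem pv_foldl_filter (p : Int → Bool) : ∀ (l acc : List Int),
    l.foldl (fun acc x => if p x then acc ++ [x] else acc) acc = acc ++ l.filter p := by
  intro l; induction l with
  | nil => simp
  | cons x xs ih => intro acc; by_cases h : p x <;> simp [List.foldl_cons, h, ih]

-- all over a zip of a unit-step range with an equal-length list, indexed form
theorem pv_all_zip (l : List Int) (a b : Int) (f : Int × Int → Bool)
    (h : (b - a).toNat = l.length) :
    ((PySem.List.pyRange a b 1).zip l).all f = true ↔
      ∀ (k : Nat) (hk : k < l.length), f (a + k, l[k]) = true := by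
  rw [pv_zip_pyRange_enum l a b h, List.all_eq_true]
  constructor
  · intro hAll k hk
    exact hAll _ ((PySem.List.mem_enumerate_iff _ _ _).2 ⟨k, hk, rfl⟩)
  · intro hAll p hp
    obtain ⟨k, hk, rfl⟩ := (PySem.List.mem_enumerate_iff _ _ _).1 hp
    exact hAll k hk

-- the per-position predicates agree on the natural domain
theorem pv_cond_eq (cols : List Int) (n r pos : Int)
    (hr0 : 0 ≤ r) (hrl : r < (cols.length : Int))
    (hc : ∀ x ∈ cols.take r.toNat, 0 ≤ x ∧ x < n)
    (hp0 : 0 ≤ pos) (hpn : pos < n) :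
    pvA_check_condition n r cols pos = pvB_ok cols r pos := by
  obtain ⟨R, rfl⟩ := Int.eq_ofNat_of_zero_le hr0
  obtain ⟨P, rfl⟩ := Int.eq_ofNat_of_zero_le hp0
  have hRlen : R < cols.length := by exact_mod_cast hrl
  have hq : ∀ s : Nat, s < R → 0 ≤ cols.getD s 0 ∧ cols.getD s 0 < n := by
    intro s hs
    have hslen : s < cols.length := lt_of_le_of_lt (Nat.le_of_lt hs) hRlen
    have hst : s < (cols.take R).length := by simp only [List.length_take]; omega
    have hmem := List.getElem_mem hst
    rw [List.getElem_take] at hmem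
    have : cols.getD s 0 ∈ List.take ((R : Int)).toNat cols := by
      rw [Int.toNat_natCast, List.getD_eq_getElem _ _ hslen]
      exact hmem
    exact hc _ this
  obtain ⟨N, rfl⟩ : ∃ N : Nat, n = (N : Int) :=
    Int.eq_ofNat_of_zero_le (le_trans hp0 (le_of_lt hpn))
  by_cases hR0 : R = 0
  · subst hR0
    simp [pvA_check_condition, pvB_ok, PySem.List.pyRange_one_eq_nil (le_refl (0 : Int))]
  -- r > 0 from here on
  have hif : (((R : Nat) : Int) == 0) = false := by
    simp only [beq_eq_false_iff_ne, ne_eq, Nat.cast_eq_zero]; exact hR0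
  -- B-side characterisation
  have hB : pvB_ok cols ((R : Nat) : Int) ((P : Nat) : Int) = true ↔
      ∀ s : Nat, s < R → cols.getD s 0 ≠ (P : Int) ∧
        ((cols.getD s 0 - (P : Int)).natAbs : Int) ≠ (R : Int) - (s : Int) := by
    unfold pvB_ok
    rw [List.all_eq_true]
    constructor
    · intro h s hs
      have hmem : ((s : Nat) : Int) ∈ PySem.List.pyRange 0 R 1 :=
        PySem.List.mem_pyRange_one.2 ⟨by positivity, by exact_mod_cast hs⟩
      have h2 := h _ hmem
      simp only [PySem.List.pyGetD_natCast, Bool.and_eq_true, Bool.not_eq_true',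
        beq_eq_false_iff_ne, ne_eq] at h2
      exact h2
    · intro h rr hmem
      obtain ⟨hb1, hb2⟩ := PySem.List.mem_pyRange_one.1 hmem
      obtain ⟨s, rfl⟩ := Int.eq_ofNat_of_zero_le hb1
      have hs : s < R := by exact_mod_cast hb2
      have h2 := h s hs
      simp only [PySem.List.pyGetD_natCast, Bool.and_eq_true, Bool.not_eq_true',
        beq_eq_false_iff_ne, ne_eq]
      exact h2
  -- vertical check
  have hslice : PySem.List.slice cols none (some ((R : Nat) : Int)) = cols.take R :=
    PySem.List.slice_to_natCast cols R
  have hV : (PySem.List.slice cols none (some ((R : Nat) : Int))).contains ((P : Nat) : Int) = true ↔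
      ∃ s : Nat, s < R ∧ cols.getD s 0 = (P : Int) := by
    rw [hslice, List.contains_iff_mem, List.mem_iff_getElem]
    constructor
    · rintro ⟨i, hi, hgi⟩
      have hiR : i < R := by simp only [List.length_take] at hi; omega
      refine ⟨i, hiR, ?_⟩
      rw [List.getElem_take] at hgi
      rw [List.getD_eq_getElem _ _ (lt_of_lt_of_le hiR (le_of_lt hRlen))]
      exact hgi
    · rintro ⟨s, hs, hgs⟩
      have hslen : s < cols.length := lt_of_lt_of_le hs (le_of_lt hRlen)
      have hst : s < (cols.take R).length := by simp only [List.length_take]; omega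
      refine ⟨s, hst, ?_⟩
      rw [List.getElem_take]
      rw [List.getD_eq_getElem _ _ hslen] at hgs
      exact hgs
  -- positive-diagonal check
  have hPosi : pvA_check_diag_posi ((N : Nat) : Int) ((R : Nat) : Int) cols ((P : Nat) : Int) = true ↔
      ∀ s : Nat, s < R → cols.getD s 0 ≠ (P : Int) - ((R : Int) - (s : Int)) := by
    unfold pvA_check_diag_posi
    simp only [hif, Bool.false_eq_true, if_false]
    by_cases hPR : ((P : Nat) : Int) < ((R : Nat) : Int)
    · have hPRn : P < R := by exact_mod_cast hPR
      rw [if_pos hPR]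
      have hcast : ((R : Nat) : Int) - ((P : Nat) : Int) = (((R - P : Nat) : Nat) : Int) := by
        omega
      rw [hcast, PySem.List.slice_natCast]
      have hlen : ((cols.drop (R - P)).take (R - (R - P))).length = P := by
        simp only [List.length_take, List.length_drop]; omega
      rw [pv_all_zip _ 0 ((P : Nat) : Int) _ (by rw [hlen]; omega)]
      constructor
      · intro h s hs
        by_cases hge : R - P ≤ s
        · have hk : s - (R - P) < ((cols.drop (R - P)).take (R - (R - P))).length := by omega
          have h2 := h (s - (R - P)) hk
          simp only [Bool.not_eq_true', beq_eq_false_iff_ne, ne_eq] at h2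
          rw [List.getElem_take, List.getElem_drop] at h2
          rw [List.getD_eq_getElem _ _ (lt_of_lt_of_le hs (le_of_lt hRlen))]
          have : R - P + (s - (R - P)) = s := by omega
          simp only [this] at h2
          intro heq; apply h2; omega
        · have hqs := hq s hs
          intro heq
          have : (0 : Int) ≤ cols.getD s 0 := hqs.1
          omega
      · intro h k hk
        have hkP : k < P := by omega
        simp only [Bool.not_eq_true', beq_eq_false_iff_ne, ne_eq]
        rw [List.getElem_take, List.getElem_drop]
        have hsR : R - P + k < R := by omega
        have h2 := h (R - P + k) hsR
        rw [List.getD_eq_getElem _ _ (lt_of_lt_of_le hsR (le_of_lt hRlen))] at h2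
        intro heq; apply h2; omega
    · have hPRn : R ≤ P := by
        have : ¬ ((P : Int) < (R : Int)) := hPR
        omega
      rw [if_neg hPR, hslice]
      have htlen : (cols.take R).length = R := by
        simp only [List.length_take]; omega
      rw [pv_all_zip _ (((P : Nat) : Int) - ((R : Nat) : Int)) ((P : Nat) : Int) _ (by rw [htlen]; omega)]
      constructor
      · intro h s hs
        have hsT : s < (cols.take R).length := by omega
        have h2 := h s hsT
        simp only [Bool.not_eq_true', beq_eq_false_iff_ne, ne_eq] at h2
        rw [List.getElem_take] at h2
        rw [List.getD_eq_getElem _ _ (lt_of_lt_of_le hs (le_of_lt hRlen))]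
        intro heq; apply h2; omega
      · intro h k hk
        have hkR : k < R := by omega
        simp only [Bool.not_eq_true', beq_eq_false_iff_ne, ne_eq]
        rw [List.getElem_take]
        have h2 := h k hkR
        rw [List.getD_eq_getElem _ _ (lt_of_lt_of_le hkR (le_of_lt hRlen))] at h2
        intro heq; apply h2; omega
  -- negative-diagonal check
  have hNega : pvA_check_diag_nega ((N : Nat) : Int) ((R : Nat) : Int) cols ((P : Nat) : Int) = true ↔
      ∀ s : Nat, s < R → cols.getD s 0 ≠ (P : Int) + ((R : Int) - (s : Int)) := by
    unfold pvA_check_diag_nega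
    simp only [hif, Bool.false_eq_true, if_false]
    have hPN : P < N := by exact_mod_cast hpn
    by_cases hbr : ((P : Nat) : Int) > ((N : Nat) : Int) - 1 - ((R : Nat) : Int)
    · have hbr' : ((N : Nat) : Int) - 1 - ((R : Nat) : Int) < ((P : Nat) : Int) := hbr
      have hNPR : N ≤ P + R := by omega
      rw [if_pos hbr]
      have hcast : ((P : Nat) : Int) + ((R : Nat) : Int) - ((N : Nat) : Int) + 1 =
          (((P + R + 1 - N : Nat) : Nat) : Int) := by omega
      rw [hcast, PySem.List.slice_natCast]
      have hQ : P + R + 1 - N ≤ R := by omega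
      have hlen : ((cols.drop (P + R + 1 - N)).take (R - (P + R + 1 - N))).length = N - P - 1 := by
        simp only [List.length_take, List.length_drop]; omega
      have hrevlen : (((cols.drop (P + R + 1 - N)).take (R - (P + R + 1 - N))).reverse).length = N - P - 1 := by
        rw [List.length_reverse, hlen]
      rw [pv_all_zip _ (((P : Nat) : Int) + 1) ((N : Nat) : Int) _ (by rw [hrevlen]; omega)]
      constructor
      · intro h s hs
        by_cases hge : P + R + 1 - N ≤ s
        · have hk : R - 1 - s < (((cols.drop (P + R + 1 - N)).take (R - (P + R + 1 - N))).reverse).length := by omega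
          have h2 := h (R - 1 - s) hk
          simp only [Bool.not_eq_true', beq_eq_false_iff_ne, ne_eq] at h2
          rw [List.getElem_reverse, List.getElem_take, List.getElem_drop] at h2
          have hidx : P + R + 1 - N + (((cols.drop (P + R + 1 - N)).take (R - (P + R + 1 - N))).length - 1 - (R - 1 - s)) = s := by
            rw [hlen]; omega
          simp only [hidx] at h2
          rw [List.getD_eq_getElem _ _ (lt_of_lt_of_le hs (le_of_lt hRlen))]
          intro heq; apply h2; omega
        · have hqs := hq s hs
          intro heq
          have : cols.getD s 0 < (N : Int) := hqs.2
          omega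
      · intro h k hk
        have hkL : k < N - P - 1 := by omega
        simp only [Bool.not_eq_true', beq_eq_false_iff_ne, ne_eq]
        rw [List.getElem_reverse, List.getElem_take, List.getElem_drop]
        have hsR : R - 1 - k < R := by omega
        have h2 := h (R - 1 - k) hsR
        rw [List.getD_eq_getElem _ _ (lt_of_lt_of_le hsR (le_of_lt hRlen))] at h2
        have hidx : P + R + 1 - N + (((cols.drop (P + R + 1 - N)).take (R - (P + R + 1 - N))).length - 1 - k) = R - 1 - k := by
          rw [hlen]; omega
        simp only [hidx]
        intro heq; apply h2; omega
    · have hbr' : ((P : Nat) : Int) ≤ ((N : Nat) : Int) - 1 - ((R : Nat) : Int) := not_lt.mp hbr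
      have hbrn : P + R + 1 ≤ N := by omega
      rw [if_neg hbr, hslice]
      have htlen : ((cols.take R).reverse).length = R := by
        rw [List.length_reverse]; simp only [List.length_take]; omega
      rw [pv_all_zip _ (((P : Nat) : Int) + 1) (((P : Nat) : Int) + ((R : Nat) : Int) + 1) _ (by rw [htlen]; omega)]
      constructor
      · intro h s hs
        have hk : R - 1 - s < ((cols.take R).reverse).length := by omega
        have h2 := h (R - 1 - s) hk
        simp only [Bool.not_eq_true', beq_eq_false_iff_ne, ne_eq] at h2
        rw [List.getElem_reverse, List.getElem_take] at h2
        have hidx : (cols.take R).length - 1 - (R - 1 - s) = s := by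
          simp only [List.length_take]; omega
        simp only [hidx] at h2
        rw [List.getD_eq_getElem _ _ (lt_of_lt_of_le hs (le_of_lt hRlen))]
        intro heq; apply h2; omega
      · intro h k hk
        have hkR : k < R := by omega
        simp only [Bool.not_eq_true', beq_eq_false_iff_ne, ne_eq]
        rw [List.getElem_reverse, List.getElem_take]
        have hidx : (cols.take R).length - 1 - k = R - 1 - k := by
          simp only [List.length_take]; omega
        simp only [hidx]
        have hsR : R - 1 - k < R := by omega
        have h2 := h (R - 1 - k) hsR
        rw [List.getD_eq_getElem _ _ (lt_of_lt_of_le hsR (le_of_lt hRlen))] at h2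
        intro heq; apply h2; omega
  -- combine
  unfold pvA_check_condition pvA_check_diag
  simp only [hif, Bool.false_eq_true, if_false]
  by_cases hV0 : (PySem.List.slice cols none (some ((R : Nat) : Int))).contains ((P : Nat) : Int) = true
  · simp only [hV0, if_true]
    obtain ⟨s, hs, hqs⟩ := hV.1 hV0
    refine Eq.symm (Bool.eq_false_iff.2 ?_)
    intro htrue
    exact ((hB.1 htrue) s hs).1 hqs
  · rw [Bool.not_eq_true] at hV0
    simp only [hV0, Bool.false_eq_true, if_false]
    have hver : ∀ s : Nat, s < R → cols.getD s 0 ≠ (P : Int) := by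
      intro s hs heq
      exact absurd ((hV.2 ⟨s, hs, heq⟩).symm.trans hV0) (by decide)
    rw [Bool.eq_iff_iff, Bool.and_eq_true, hPosi, hNega, hB]
    constructor
    · rintro ⟨h1, h2⟩ s hs
      have h1s := h1 s hs
      have h2s := h2 s hs
      refine ⟨hver s hs, ?_⟩
      omega
    · intro h
      constructor <;> intro s hs <;> have h2 := h s hs <;> have hqs := hq s hs <;> omega

theorem pv_legit_eq (cols : List Int) (n r : Int)
    (hpre : Pre_generate_solution_list cols n r) :
    pvA_legit_position n r cols = (PySem.List.pyRange 0 n 1).filter (fun c => pvB_ok cols r c) := by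
  unfold pvA_legit_position
  rw [pv_foldl_filter]
  simp only [List.nil_append]
  rcases hpre with hn | ⟨hr0, hrl, hc⟩
  · rw [PySem.List.pyRange_one_eq_nil (by omega)]
    simp
  · refine List.filter_congr ?_
    intro c hmem
    have hb := (PySem.List.mem_pyRange_one).1 hmem
    exact pv_cond_eq cols n r c hr0 hrl hc hb.1 hb.2

-- ===== VERDICT (by name: the statement is the Claim_ definition above) =====
theorem generate_solution_list_spec : Claim_equal_generate_solution_list := by
  intro cols n r _ hpre
  unfold Spec_generate_solution_list generate_solution_list generate_solution_list_alt
  rw [pv_legit_eq cols n r hpre]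
  set legit := (PySem.List.pyRange 0 n 1).filter (fun c => pvB_ok cols r c) with hl
  by_cases h : legit = []
  · simp [h]
  · have hne : (legit == []) = false := by simpa using h
    simp only [hne, Bool.false_eq_true, if_false]
    rw [PySem.List.foldl_pyRange_zero_pyGetD' legit 0
      (fun acc v => acc ++ [PySem.List.pySetD cols r v]) []]
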